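-- pv_equiv track=rewrite | github.com/nickbuida/Green62Repo | L04Ex/75A.py | remove_zeros
-- ===== SOURCE A (Python) =====
-- def remove_zeros(x):
--     result = 0
--     place = 1
--     while x > 0:
--         digit = x % 10
--         if digit != 0:
--             result += digit * place
--             place *= 10
--         x //= 10
--     return result
-- ===== SOURCE B (Python) =====
-- def remove_zeros(x):
--     # recursive, most-significant-first rebuild: no place/result accumulators
--     if x <= 0:
--         return 0
--     d = x % 10
--     rest = remove_zeros(x // 10)
--     return rest * 10 + d if d else rest
-- ===== Notes on version B (the rewrite author's own statement) =====
-- stated objective: simpler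
-- what changed: Replaces the while loop with its result/place accumulators by a direct structural recursion on the remaining digits that rebuilds the number most-significant-first, eliminating the place variable entirely.
import Mathlib
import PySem

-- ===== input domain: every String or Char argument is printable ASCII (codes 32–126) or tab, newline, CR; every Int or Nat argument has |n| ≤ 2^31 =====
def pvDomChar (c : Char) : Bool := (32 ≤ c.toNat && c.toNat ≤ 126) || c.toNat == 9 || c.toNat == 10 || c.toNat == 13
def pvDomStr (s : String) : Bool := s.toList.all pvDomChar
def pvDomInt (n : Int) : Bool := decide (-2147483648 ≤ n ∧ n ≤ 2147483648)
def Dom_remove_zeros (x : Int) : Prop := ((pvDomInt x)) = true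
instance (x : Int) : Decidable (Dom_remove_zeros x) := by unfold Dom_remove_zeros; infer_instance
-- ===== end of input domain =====

-- B replaces A's while loop with result/place accumulators by a direct recursion on x // 10 (simpler; same cost).

-- termination helper for both ports: x // 10 strictly shrinks a positive x
theorem pv_floordiv10_toNat_lt (x : Int) (h : 0 < x) :
    (PySem.Int.floordiv x 10).toNat < x.toNat := by
  have h1 : PySem.Int.floordiv x 10 < x := by
    rw [PySem.Int.floordiv_lt_iff_lt_mul (by norm_num)]; nlinarith
  have h2 : (0 : Int) ≤ PySem.Int.floordiv x 10 :=
    (PySem.Int.le_floordiv_iff_mul_le (a := x) (b := 10) (q := 0) (by norm_num)).mpr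
      (by nlinarith)
  omega

-- ===== PORT A =====
-- the while loop of A, state (x, result, place)
def removeZerosLoop (x result place : Int) : Int :=
  if h : x > 0 then
    let digit := PySem.Int.mod x 10
    if digit ≠ 0 then
      removeZerosLoop (PySem.Int.floordiv x 10) (result + digit * place) (place * 10)
    else
      removeZerosLoop (PySem.Int.floordiv x 10) result place
  else result
termination_by x.toNat
decreasing_by all_goals exact pv_floordiv10_toNat_lt x h

def remove_zeros (x : Int) : Int := removeZerosLoop x 0 1

-- ===== PORT B =====
def remove_zeros_alt (x : Int) : Int :=
  if h : x ≤ 0 then 0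
  else
    let d := PySem.Int.mod x 10
    let rest := remove_zeros_alt (PySem.Int.floordiv x 10)
    if d ≠ 0 then rest * 10 + d else rest
termination_by x.toNat
decreasing_by exact pv_floordiv10_toNat_lt x (by omega)

-- ===== PRECONDITION & SPEC =====
def Spec_remove_zeros (x : Int) (out : Int) : Prop := out = remove_zeros_alt x
instance (x : Int) (out : Int) : Decidable (Spec_remove_zeros x out) := by unfold Spec_remove_zeros; infer_instance

-- ===== CLAIM (what is proved, stated in full; the proofs are below) =====
def Claim_equal_remove_zeros : Prop := ∀ (x : Int), Dom_remove_zeros x → Spec_remove_zeros x (remove_zeros x)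

-- ===== LEMMAS AND PROOFS =====
-- loop invariant: the accumulator pair (result, place) factors out of the loop
theorem removeZerosLoop_eq (n : Nat) :
    ∀ (x : Int), x.toNat = n → ∀ (r p : Int),
      removeZerosLoop x r p = r + p * remove_zeros_alt x := by
  induction n using Nat.strong_induction_on with
  | _ n ih =>
    intro x hx r p
    rw [removeZerosLoop]
    by_cases hpos : x > 0
    · have hlt := pv_floordiv10_toNat_lt x hpos
      have ihx := ih _ (by omega) (PySem.Int.floordiv x 10) rfl
      rw [remove_zeros_alt]
      simp only [dif_pos hpos, dif_neg (show ¬ x ≤ 0 by omega)]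
      split_ifs with hd <;> rw [ihx] <;> ring
    · rw [remove_zeros_alt]
      simp only [dif_neg hpos, dif_pos (by omega : x ≤ 0)]
      ring

-- ===== VERDICT (by name: the statement is the Claim_ definition above) =====
theorem remove_zeros_spec : Claim_equal_remove_zeros := by
  intro x _
  unfold Spec_remove_zeros remove_zeros
  rw [removeZerosLoop_eq x.toNat x rfl]
  ring
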